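-- pv_equiv track=rewrite | github.com/tender-tales/platform | tender_tales/api/routes.py | _determine_zoom_level
-- ===== SOURCE A (Python) =====
-- def _determine_zoom_level(place_types: list[str]) -> int:
--     """Determine appropriate zoom level based on place types."""
--     zoom_mappings = [
--         (["street_address", "premise", "point_of_interest"], 15),
--         (["neighborhood", "sublocality"], 13),
--         (["locality", "administrative_area_level_3"], 11),
--         (["administrative_area_level_2", "administrative_area_level_1"], 9),
--         (["country"], 6),
--     ]
--
--     for type_list, zoom in zoom_mappings:
--         if any(t in place_types for t in type_list):
--             return zoom
--
--     return 10
-- ===== SOURCE B (Python) =====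
-- _ZOOM_BY_TYPE = {
--     "street_address": 15, "premise": 15, "point_of_interest": 15,
--     "neighborhood": 13, "sublocality": 13,
--     "locality": 11, "administrative_area_level_3": 11,
--     "administrative_area_level_2": 9, "administrative_area_level_1": 9,
--     "country": 6,
-- }
--
--
-- def _determine_zoom_level(place_types: list[str]) -> int:
--     """Determine appropriate zoom level based on place types."""
--     matched = [_ZOOM_BY_TYPE[t] for t in place_types if t in _ZOOM_BY_TYPE]
--     return max(matched) if matched else 10
-- ===== Notes on version B (the rewrite author's own statement) =====
-- stated objective: idiomatic
-- what changed: Replaced the ordered group-list scan with early return by a flat type->zoom dict: collect zooms of matched types in one pass and return max(matched) (default 10 when nothing matched), relying on the groups' zooms being strictly descending; one hash lookup per element instead of up to 10 list-membership scans.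
import Mathlib
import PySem

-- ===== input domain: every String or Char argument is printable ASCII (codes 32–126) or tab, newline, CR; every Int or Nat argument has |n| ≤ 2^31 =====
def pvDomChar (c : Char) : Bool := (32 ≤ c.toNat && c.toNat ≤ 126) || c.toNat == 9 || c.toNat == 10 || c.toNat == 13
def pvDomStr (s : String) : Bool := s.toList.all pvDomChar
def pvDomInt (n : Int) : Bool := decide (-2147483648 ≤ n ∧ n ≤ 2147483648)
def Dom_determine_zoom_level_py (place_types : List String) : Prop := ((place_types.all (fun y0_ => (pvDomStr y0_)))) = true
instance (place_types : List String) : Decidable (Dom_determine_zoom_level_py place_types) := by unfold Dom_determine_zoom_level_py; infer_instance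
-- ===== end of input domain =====

-- B replaces A's ordered group scan by a flat type->zoom dict and one pass taking the max of matched zooms (idiomatic; same cost).

-- ===== PORT A =====
-- A's loop over zoom_mappings with an early return, unrolled in the same order.
def determine_zoom_level_py (place_types : List String) : Int :=
  if (["street_address", "premise", "point_of_interest"].any
        (fun t => place_types.contains t)) then 15
  else if (["neighborhood", "sublocality"].any
        (fun t => place_types.contains t)) then 13
  else if (["locality", "administrative_area_level_3"].any
        (fun t => place_types.contains t)) then 11
  else if (["administrative_area_level_2", "administrative_area_level_1"].any
        (fun t => place_types.contains t)) then 9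
  else if (["country"].any (fun t => place_types.contains t)) then 6
  else 10

-- ===== PORT B =====
-- the module-level dict _ZOOM_BY_TYPE as an insertion-ordered Dict
def pvZoomByType : PySem.Dict String Int :=
  PySem.Dict.mk
    [("street_address", 15), ("premise", 15), ("point_of_interest", 15),
     ("neighborhood", 13), ("sublocality", 13),
     ("locality", 11), ("administrative_area_level_3", 11),
     ("administrative_area_level_2", 9), ("administrative_area_level_1", 9),
     ("country", 6)]

def determine_zoom_level_py_alt (place_types : List String) : Int :=
  let matched := place_types.filterMap (fun t => pvZoomByType.get? t)
  match PySem.List.max? matched (fun z => z) with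
  | some m => m
  | none => 10

-- ===== PRECONDITION & SPEC =====
def Spec_determine_zoom_level_py (place_types : List String) (out : Int) : Prop := out = determine_zoom_level_py_alt place_types
instance (place_types : List String) (out : Int) : Decidable (Spec_determine_zoom_level_py place_types out) := by unfold Spec_determine_zoom_level_py; infer_instance

-- ===== CLAIM (what is proved, stated in full; the proofs are below) =====
def Claim_equal_determine_zoom_level_py : Prop := ∀ (place_types : List String), Dom_determine_zoom_level_py place_types → Spec_determine_zoom_level_py place_types (determine_zoom_level_py place_types)

-- ===== LEMMAS AND PROOFS =====

-- full case analysis of the dict lookup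
lemma zoom_lookup_cases (t : String) (z : Int) (h : pvZoomByType.get? t = some z) :
    (z = 15 ∧ (t = "street_address" ∨ t = "premise" ∨ t = "point_of_interest")) ∨
    (z = 13 ∧ (t = "neighborhood" ∨ t = "sublocality")) ∨
    (z = 11 ∧ (t = "locality" ∨ t = "administrative_area_level_3")) ∨
    (z = 9 ∧ (t = "administrative_area_level_2" ∨ t = "administrative_area_level_1")) ∨
    (z = 6 ∧ t = "country") := by
  simp only [pvZoomByType, PySem.Dict.get?_mk_cons, beq_iff_eq] at h
  split_ifs at h with h1 h2 h3 h4 h5 h6 h7 h8 h9 h10 <;>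
    first
      | (simp_all)
      | (simp [PySem.Dict.get?] at h)

-- if some matched zoom equals z0 and every matched zoom is ≤ z0, B returns z0
lemma alt_eq_of_max (place_types : List String) (z0 : Int)
    (hmem : z0 ∈ place_types.filterMap (fun t => pvZoomByType.get? t))
    (hub : ∀ z ∈ place_types.filterMap (fun t => pvZoomByType.get? t), z ≤ z0) :
    determine_zoom_level_py_alt place_types = z0 := by
  unfold determine_zoom_level_py_alt
  rcases hx : PySem.List.max? (place_types.filterMap (fun t => pvZoomByType.get? t)) (fun z => z) with _ | m
  · rw [PySem.List.max?_eq_none_iff] at hx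
    simp [hx] at hmem
  · have hm := PySem.List.max?_mem hx
    have hmax := PySem.List.max?_isMax hx
    simp only [hx]
    exact le_antisymm (hub m hm) (hmax z0 hmem)

-- ===== VERDICT (by name: the statement is the Claim_ definition above) =====
theorem determine_zoom_level_py_spec : Claim_equal_determine_zoom_level_py := by
  intro pt _
  show determine_zoom_level_py pt = determine_zoom_level_py_alt pt
  unfold determine_zoom_level_py
  simp only [List.any_cons, List.any_nil, Bool.or_false, Bool.or_eq_true,
    List.contains_iff_mem]
  by_cases h15 : "street_address" ∈ pt ∨ "premise" ∈ pt ∨ "point_of_interest" ∈ pt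
  · rw [if_pos (by tauto)]
    refine (alt_eq_of_max pt 15 ?_ ?_).symm
    · rw [List.mem_filterMap]
      rcases h15 with h | h | h <;> exact ⟨_, h, by decide⟩
    · intro z hz
      rw [List.mem_filterMap] at hz
      obtain ⟨t, _, ht⟩ := hz
      rcases zoom_lookup_cases t z ht with ⟨hz, _⟩|⟨hz, _⟩|⟨hz, _⟩|⟨hz, _⟩|⟨hz, _⟩ <;> omega
  · rw [if_neg (by tauto)]
    by_cases h13 : "neighborhood" ∈ pt ∨ "sublocality" ∈ pt
    · rw [if_pos (by tauto)]
      refine (alt_eq_of_max pt 13 ?_ ?_).symm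
      · rw [List.mem_filterMap]
        rcases h13 with h | h <;> exact ⟨_, h, by decide⟩
      · intro z hz
        rw [List.mem_filterMap] at hz
        obtain ⟨t, htp, ht⟩ := hz
        rcases zoom_lookup_cases t z ht with ⟨hz, hg⟩|⟨hz, _⟩|⟨hz, _⟩|⟨hz, _⟩|⟨hz, _⟩
        · exact absurd (by rcases hg with h|h|h <;> subst h <;> tauto) h15
        all_goals omega
    · rw [if_neg (by tauto)]
      by_cases h11 : "locality" ∈ pt ∨ "administrative_area_level_3" ∈ pt
      · rw [if_pos (by tauto)]
        refine (alt_eq_of_max pt 11 ?_ ?_).symm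
        · rw [List.mem_filterMap]
          rcases h11 with h | h <;> exact ⟨_, h, by decide⟩
        · intro z hz
          rw [List.mem_filterMap] at hz
          obtain ⟨t, htp, ht⟩ := hz
          rcases zoom_lookup_cases t z ht with ⟨hz, hg⟩|⟨hz, hg⟩|⟨hz, _⟩|⟨hz, _⟩|⟨hz, _⟩
          · exact absurd (by rcases hg with h|h|h <;> subst h <;> tauto) h15
          · exact absurd (by rcases hg with h|h <;> subst h <;> tauto) h13
          all_goals omega
      · rw [if_neg (by tauto)]
        by_cases h9 : "administrative_area_level_2" ∈ pt ∨ "administrative_area_level_1" ∈ pt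
        · rw [if_pos (by tauto)]
          refine (alt_eq_of_max pt 9 ?_ ?_).symm
          · rw [List.mem_filterMap]
            rcases h9 with h | h <;> exact ⟨_, h, by decide⟩
          · intro z hz
            rw [List.mem_filterMap] at hz
            obtain ⟨t, htp, ht⟩ := hz
            rcases zoom_lookup_cases t z ht with ⟨hz, hg⟩|⟨hz, hg⟩|⟨hz, hg⟩|⟨hz, _⟩|⟨hz, _⟩
            · exact absurd (by rcases hg with h|h|h <;> subst h <;> tauto) h15
            · exact absurd (by rcases hg with h|h <;> subst h <;> tauto) h13
            · exact absurd (by rcases hg with h|h <;> subst h <;> tauto) h11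
            all_goals omega
        · rw [if_neg (by tauto)]
          by_cases h6 : "country" ∈ pt
          · rw [if_pos (by tauto)]
            refine (alt_eq_of_max pt 6 ?_ ?_).symm
            · rw [List.mem_filterMap]
              exact ⟨_, h6, by decide⟩
            · intro z hz
              rw [List.mem_filterMap] at hz
              obtain ⟨t, htp, ht⟩ := hz
              rcases zoom_lookup_cases t z ht with ⟨hz, hg⟩|⟨hz, hg⟩|⟨hz, hg⟩|⟨hz, hg⟩|⟨hz, _⟩
              · exact absurd (by rcases hg with h|h|h <;> subst h <;> tauto) h15
              · exact absurd (by rcases hg with h|h <;> subst h <;> tauto) h13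
              · exact absurd (by rcases hg with h|h <;> subst h <;> tauto) h11
              · exact absurd (by rcases hg with h|h <;> subst h <;> tauto) h9
              · omega
          · rw [if_neg (by tauto)]
            have hempty : pt.filterMap (fun t => pvZoomByType.get? t) = [] := by
              rw [List.eq_nil_iff_forall_not_mem]
              intro z hz
              rw [List.mem_filterMap] at hz
              obtain ⟨t, htp, ht⟩ := hz
              rcases zoom_lookup_cases t z ht with ⟨_, hg⟩|⟨_, hg⟩|⟨_, hg⟩|⟨_, hg⟩|⟨_, hg⟩
              · exact h15 (by rcases hg with h|h|h <;> subst h <;> tauto)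
              · exact h13 (by rcases hg with h|h <;> subst h <;> tauto)
              · exact h11 (by rcases hg with h|h <;> subst h <;> tauto)
              · exact h9 (by rcases hg with h|h <;> subst h <;> tauto)
              · exact h6 (hg ▸ htp)
            unfold determine_zoom_level_py_alt
            rw [hempty]
            simp [PySem.List.max?]
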